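-- pv_equiv track=rewrite | github.com/OTOY-NZ/OctaneBlender | blender/intern/octane/blender/addon/utils/utility.py | blender_path_frame
-- ===== SOURCE A (Python) =====
-- def blender_path_frame(template, frame, ensure_digits=None):
--     hash_sequence = ""
--     max_hash_sequence = ""
--
--     count = 0
--     for char in template:
--         if char == "#":
--             count += 1
--             hash_sequence += "#"
--         else:
--             if len(hash_sequence) > len(max_hash_sequence):
--                 max_hash_sequence = hash_sequence
--             count = 0
--             hash_sequence = ""
--
--     if len(hash_sequence) > len(max_hash_sequence):
--         max_hash_sequence = hash_sequence
--
--     if max_hash_sequence: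
--         digits = len(max_hash_sequence)
--         return template.replace(max_hash_sequence, f"{frame:0{digits}d}")
--     elif ensure_digits is not None:
--         return f"{template}_{frame:0{ensure_digits}d}"
--     else:
--         return f"{template}_{frame}"
-- ===== SOURCE B (Python) =====
-- def blender_path_frame(template, frame, ensure_digits=None):
--     # Collect every contiguous '#'-run at once: mask non-'#' chars to spaces and split.
--     runs = "".join(c if c == "#" else " " for c in template).split()
--     if runs:
--         longest = max(runs, key=len)
--         return template.replace(longest, f"{frame:0{len(longest)}d}")
--     if ensure_digits is not None:
--         return f"{template}_{frame:0{ensure_digits}d}"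
--     return f"{template}_{frame}"
-- ===== Notes on version B (the rewrite author's own statement) =====
-- stated objective: alternative
-- what changed: B replaces A's character-by-character accumulator scan (growing hash_sequence/max_hash_sequence) by a build-all-then-reduce decomposition: mask every non-'#' character to a space, split() to get all '#'-runs at once, and take the first longest with max(key=len).
import Mathlib
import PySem

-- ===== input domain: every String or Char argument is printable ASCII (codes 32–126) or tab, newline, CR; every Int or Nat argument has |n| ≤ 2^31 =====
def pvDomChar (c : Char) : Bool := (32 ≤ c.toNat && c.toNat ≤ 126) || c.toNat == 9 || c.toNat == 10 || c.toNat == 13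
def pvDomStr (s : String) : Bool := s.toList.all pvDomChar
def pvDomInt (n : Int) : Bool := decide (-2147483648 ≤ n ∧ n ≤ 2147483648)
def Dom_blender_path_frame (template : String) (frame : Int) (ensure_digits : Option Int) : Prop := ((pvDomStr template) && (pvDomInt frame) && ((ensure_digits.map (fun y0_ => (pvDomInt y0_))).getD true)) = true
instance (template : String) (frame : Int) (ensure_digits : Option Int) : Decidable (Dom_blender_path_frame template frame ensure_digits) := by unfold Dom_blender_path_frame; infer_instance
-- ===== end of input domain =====

-- B rewrites A's manual accumulator scan as mask-to-spaces + split + max(key=len); same cost, different decomposition (objective: alternative).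

-- shared helper: both Source A and Source B contain the same f-string f"{frame:0{w}d}";
-- for an int and width w ≥ 0 it is exactly str(frame).zfill(w) (zero-pad, sign kept in front).
def pvFmt (frame : Int) (w : Int) : String := PySem.Str.zfill (PySem.Int.toStr frame) w

-- ===== PORT A =====
-- the loop body of A (st = (hash_sequence, max_hash_sequence, count))
def pvAStep (st : List Char × List Char × Int) (c : Char) : List Char × List Char × Int :=
  if c = '#' then (st.1 ++ ['#'], st.2.1, st.2.2 + 1)
  else if st.2.1.length < st.1.length then ([], st.1, 0) else ([], st.2.1, 0)

def blender_path_frame (template : String) (frame : Int) (ensure_digits : Option Int) : String :=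
  let st := template.toList.foldl pvAStep ([], [], 0)
  let maxSeq := if st.2.1.length < st.1.length then st.1 else st.2.1
  if maxSeq ≠ [] then
    PySem.Str.replace template (String.ofList maxSeq) (pvFmt frame maxSeq.length)
  else match ensure_digits with
    | some d => template ++ "_" ++ pvFmt frame d
    | none => template ++ "_" ++ PySem.Int.toStr frame

-- ===== PORT B =====
def blender_path_frame_alt (template : String) (frame : Int) (ensure_digits : Option Int) : String :=
  let runs := PySem.Str.split₀ (String.ofList (template.toList.map (fun c => if c = '#' then c else ' ')))
  if !runs.isEmpty then
    let longest := PySem.List.maxD runs PySem.Str.len ""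
    PySem.Str.replace template longest (pvFmt frame (PySem.Str.len longest))
  else match ensure_digits with
    | some d => template ++ "_" ++ pvFmt frame d
    | none => template ++ "_" ++ PySem.Int.toStr frame

-- ===== PRECONDITION & SPEC =====
-- A raises ValueError exactly when template contains no '#' and ensure_digits is a negative int
-- (the format spec f"{frame:0{ensure_digits}d}" is invalid); those inputs are excluded.
def Pre_blender_path_frame (template : String) (frame : Int) (ensure_digits : Option Int) : Prop :=
  PySem.Str.isIn "#" template = true ∨ 0 ≤ ensure_digits.getD 0
instance (template : String) (frame : Int) (ensure_digits : Option Int) : Decidable (Pre_blender_path_frame template frame ensure_digits) := by unfold Pre_blender_path_frame; infer_instance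

def pvWitness_blender_path_frame : String × Int × Option Int := ("v_###.png", 12, some 4)

def Spec_blender_path_frame (template : String) (frame : Int) (ensure_digits : Option Int) (out : String) : Prop := out = blender_path_frame_alt template frame ensure_digits
instance (template : String) (frame : Int) (ensure_digits : Option Int) (out : String) : Decidable (Spec_blender_path_frame template frame ensure_digits out) := by unfold Spec_blender_path_frame; infer_instance

-- ===== CLAIM (what is proved, stated in full; the proofs are below) =====
def Claim_equal_blender_path_frame : Prop := ∀ (template : String) (frame : Int) (ensure_digits : Option Int), Dom_blender_path_frame template frame ensure_digits → Pre_blender_path_frame template frame ensure_digits → Spec_blender_path_frame template frame ensure_digits (blender_path_frame template frame ensure_digits)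

-- ===== LEMMAS AND PROOFS =====

-- "new max if strictly longer" step shared by A's flush and Python's max(key=len)
def pvUpd (b r : List Char) : List Char := if b.length < r.length then r else b

-- the '#'-mask Source B applies before splitting
def pvMask (cs : List Char) : List Char := cs.map (fun c => if c = '#' then c else ' ')

theorem pv_go_append (l cur : List Char) (acc : List (List Char)) :
    PySem.Chars.split₀.go l cur acc = acc.reverse ++ PySem.Chars.split₀.go l cur [] := by
  induction l generalizing cur acc with
  | nil => simp [PySem.Chars.split₀.go]; split <;> simp
  | cons c rest ih =>
    simp only [PySem.Chars.split₀.go]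
    split
    · split
      · exact ih _ _
      · rw [ih [] (cur.reverse :: acc), ih [] [cur.reverse]]; simp
    · exact ih _ _

theorem pv_go_ne_nil (l : List Char) : ∀ cur acc, (∀ a ∈ acc, a ≠ []) →
    ∀ r ∈ PySem.Chars.split₀.go l cur acc, r ≠ [] := by
  induction l with
  | nil =>
    intro cur acc hacc r hr
    simp only [PySem.Chars.split₀.go] at hr
    split at hr
    · exact hacc r (List.mem_reverse.mp hr)
    · rename_i hne
      rw [List.mem_reverse] at hr
      rcases List.mem_cons.mp hr with h | h
      · subst h
        intro h0
        exact hne (by simp [List.reverse_eq_nil_iff.mp h0])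
      · exact hacc r h
  | cons c rest ih =>
    intro cur acc hacc r hr
    simp only [PySem.Chars.split₀.go] at hr
    split at hr
    · split at hr
      · exact ih _ _ hacc r hr
      · refine ih _ _ ?_ r hr
        intro a ha
        rcases List.mem_cons.mp ha with h | h
        · rename_i hne; subst h; intro h0; simp [List.reverse_eq_nil_iff.mp h0] at hne
        · exact hacc a h
    · exact ih _ _ hacc r hr

theorem pv_main (cs : List Char) : ∀ (hs ms : List Char) (count : Int),
    (let st := List.foldl pvAStep (hs, ms, count) cs;
     if st.2.1.length < st.1.length then st.1 else st.2.1)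
    = List.foldl pvUpd ms (PySem.Chars.split₀.go (pvMask cs) hs.reverse []) := by
  induction cs with
  | nil =>
    intro hs ms count
    simp only [List.foldl_nil, pvMask, List.map_nil, PySem.Chars.split₀.go]
    by_cases h : hs = []
    · subst h; simp
    · simp [List.isEmpty_eq_false_iff.mpr (by simpa using h), pvUpd]
  | cons c rest ih =>
    intro hs ms count
    rw [List.foldl_cons, show pvMask (c :: rest) = ((if c = '#' then c else ' ') :: pvMask rest) from rfl]
    by_cases hc : c = '#'
    · subst hc
      have h1 : pvAStep (hs, ms, count) '#' = (hs ++ ['#'], ms, count + 1) := by simp [pvAStep]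
      have h2 : (if ('#' : Char) = '#' then '#' else ' ') = '#' := by simp
      have h3 : PySem.Chars.split₀.go ('#' :: pvMask rest) hs.reverse []
          = PySem.Chars.split₀.go (pvMask rest) ('#' :: hs.reverse) [] := by
        simp only [PySem.Chars.split₀.go]
        rw [show PySem.Chars.isspace '#' = false from by decide]
        simp
      rw [h1, h2, h3]
      simpa [List.reverse_append] using ih (hs ++ ['#']) ms (count + 1)
    · simp only [pvAStep, if_neg hc]
      have hsp : PySem.Chars.isspace ' ' = true := rfl
      by_cases h0 : hs = []
      · subst h0
        simp only [PySem.Chars.split₀.go, hsp, List.reverse_nil, List.isEmpty_nil, if_true]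
        simpa [pvMask, pvUpd] using ih [] ms 0
      · have : (if ms.length < hs.length then (([] : List Char), hs, (0:Int)) else (([] : List Char), ms, (0:Int)))
            = (([] : List Char), pvUpd ms hs, (0:Int)) := by unfold pvUpd; split <;> simp
        rw [this]
        simp only [PySem.Chars.split₀.go, hsp, if_true]
        rw [pv_go_append _ [] [hs.reverse.reverse], List.reverse_reverse]
        simpa [pvMask, pvUpd, h0] using ih [] (pvUpd ms hs) 0

theorem pv_len_le_foldl_upd (crs : List (List Char)) : ∀ m : List Char,
    m.length ≤ (List.foldl pvUpd m crs).length := by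
  induction crs with
  | nil => intro m; simp
  | cons r rs ih =>
    intro m
    refine le_trans ?_ (ih (pvUpd m r))
    unfold pvUpd; split <;> omega

theorem pv_max_cons_cons {α κ : Type} [LT κ] [DecidableLT κ] (a b : α) (l : List α) (key : α → κ) :
    PySem.List.max? (a :: b :: l) key = PySem.List.max? ((if key a < key b then b else a) :: l) key := by
  simp only [PySem.List.max?, List.foldl_cons]
  split <;> rfl

theorem pv_maxfold (cruns : List (List Char)) : ∀ m : List Char,
    PySem.List.max? (List.map String.ofList (m :: cruns)) PySem.Str.len
    = some (String.ofList (List.foldl pvUpd m cruns)) := by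
  induction cruns with
  | nil => intro m; simp [PySem.List.max?]
  | cons r rs ih =>
    intro m
    rw [List.map_cons, List.map_cons, pv_max_cons_cons,
      show (if PySem.Str.len (String.ofList m) < PySem.Str.len (String.ofList r)
          then String.ofList r else String.ofList m) = String.ofList (pvUpd m r) by
        by_cases hmr : m.length < r.length <;> simp [pvUpd, hmr],
      List.foldl_cons]
    exact ih (pvUpd m r)

-- ===== VERDICT (by name: the statement is the Claim_ definition above) =====
theorem pv_upd_nil (cr : List Char) : pvUpd [] cr = cr := by
  unfold pvUpd; cases cr <;> simp

theorem blender_path_frame_spec : Claim_equal_blender_path_frame := by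
  intro template frame ensure_digits _hDom _hPre
  unfold Spec_blender_path_frame
  simp only [blender_path_frame, blender_path_frame_alt, PySem.Str.split₀,
    String.toList_ofList]
  have hmain : (if (List.foldl pvAStep ([], [], 0) template.toList).2.1.length <
        (List.foldl pvAStep ([], [], 0) template.toList).1.length then
        (List.foldl pvAStep ([], [], 0) template.toList).1
      else (List.foldl pvAStep ([], [], 0) template.toList).2.1)
      = List.foldl pvUpd [] (PySem.Chars.split₀ (pvMask template.toList)) := by
    simpa [PySem.Chars.split₀] using pv_main template.toList [] [] 0
  rw [show List.map (fun c => if c = '#' then c else ' ') template.toList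
      = pvMask template.toList from rfl]
  rcases hE : PySem.Chars.split₀ (pvMask template.toList) with _ | ⟨cr, crs⟩
  · rw [hE] at hmain
    simp only [List.foldl_nil] at hmain
    rw [hmain]
    simp
  · rw [hE] at hmain
    have hcr_ne : cr ≠ [] := by
      refine pv_go_ne_nil (pvMask template.toList) [] [] (by simp) cr ?_
      rw [show PySem.Chars.split₀.go (pvMask template.toList) [] []
          = PySem.Chars.split₀ (pvMask template.toList) from rfl, hE]
      exact List.mem_cons_self
    simp only [List.foldl_cons, pv_upd_nil] at hmain
    have hne : List.foldl pvUpd cr crs ≠ [] := by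
      have hlen := pv_len_le_foldl_upd crs cr
      intro h0
      rw [h0] at hlen
      simp only [List.length_nil, Nat.le_zero] at hlen
      exact hcr_ne (List.eq_nil_of_length_eq_zero hlen)
    rw [hmain]
    have hmax : PySem.List.maxD (List.map String.ofList (cr :: crs)) PySem.Str.len ""
        = String.ofList (List.foldl pvUpd cr crs) := by
      simp only [PySem.List.maxD]
      rw [pv_maxfold crs cr]
      rfl
    rw [hmax]
    simp [hne, PySem.Str.len_eq]
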